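-- pv_equiv track=rewrite | github.com/oliviernguyenquoc/advent-of-code | 2025/day4/day4.py | get_movable_rolls
-- ===== SOURCE A (Python) =====
-- def get_movable_rolls(
--     roll_set: set[tuple[int, int]], MAX_X: int, MAX_Y: int
-- ) -> set[tuple[int, int]]:
--     DIRECTIONS = [(x, y) for x in (-1, 0, 1) for y in (-1, 0, 1) if (x, y) != (0, 0)]
--     movable_rolls: set[tuple[int, int]] = set()
--
--     for roll_x, roll_y in roll_set:
--         adjacent_rolls = 0
--         for x, y in DIRECTIONS:
--             if (
--                 0 <= roll_x + x <= MAX_X - 1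
--                 and 0 <= roll_y + y <= MAX_Y - 1
--                 and (roll_x + x, roll_y + y) in roll_set
--             ):
--                 adjacent_rolls += 1
--
--         if adjacent_rolls < 4:
--             movable_rolls.add((roll_x, roll_y))
--
--     return movable_rolls
-- ===== SOURCE B (Python) =====
-- def get_movable_rolls(
--     roll_set: set[tuple[int, int]], MAX_X: int, MAX_Y: int
-- ) -> set[tuple[int, int]]:
--     DIRECTIONS = [(x, y) for x in (-1, 0, 1) for y in (-1, 0, 1) if (x, y) != (0, 0)]
--     # scatter pass: each in-bounds roll adds 1 to each of its neighbours' tallies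
--     count = {r: 0 for r in roll_set}
--     for s_x, s_y in roll_set:
--         if 0 <= s_x <= MAX_X - 1 and 0 <= s_y <= MAX_Y - 1:
--             for d_x, d_y in DIRECTIONS:
--                 t = (s_x + d_x, s_y + d_y)
--                 if t in roll_set:
--                     count[t] += 1
--     return {r for r in roll_set if count[r] < 4}
-- ===== Notes on version B (the rewrite author's own statement) =====
-- stated objective: alternative
-- what changed: B scatters: it builds a tally dictionary initialised to 0 for every roll, has each in-bounds roll increment the tally of each of its 8 neighbours that is itself a roll, and finally selects the rolls whose tally is below 4, instead of A's gathering loop that counts each roll's own in-bounds neighbours.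
import Mathlib
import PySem

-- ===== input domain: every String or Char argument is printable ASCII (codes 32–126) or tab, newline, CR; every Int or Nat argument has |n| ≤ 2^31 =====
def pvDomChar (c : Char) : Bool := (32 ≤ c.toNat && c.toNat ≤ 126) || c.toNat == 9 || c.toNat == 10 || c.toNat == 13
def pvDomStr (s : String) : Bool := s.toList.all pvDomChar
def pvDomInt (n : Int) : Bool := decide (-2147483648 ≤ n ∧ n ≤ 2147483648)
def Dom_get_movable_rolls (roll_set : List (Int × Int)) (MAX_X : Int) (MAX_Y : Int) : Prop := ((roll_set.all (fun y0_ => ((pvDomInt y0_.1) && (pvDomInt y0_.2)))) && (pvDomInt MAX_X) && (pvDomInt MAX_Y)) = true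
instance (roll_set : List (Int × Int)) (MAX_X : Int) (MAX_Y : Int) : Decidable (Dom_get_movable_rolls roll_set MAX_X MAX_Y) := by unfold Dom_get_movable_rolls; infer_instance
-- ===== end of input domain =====

-- B replaces A's per-roll neighbour-gathering count by a scatter pass into a tally dictionary
-- plus a final filtering pass (different decomposition, same cost).

-- ===== PORT A =====
-- the DIRECTIONS comprehension (textually identical in Source A and Source B)
def pvDirs : List (Int × Int) :=
  ([-1, 0, 1] : List Int).flatMap (fun x =>
    ([-1, 0, 1] : List Int).filterMap (fun y =>
      if (x, y) ≠ ((0 : Int), (0 : Int)) then some (x, y) else none))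

def get_movable_rolls (roll_set : List (Int × Int)) (MAX_X : Int) (MAX_Y : Int) : List (Int × Int) :=
  (PySem.Set.ofList roll_set).foldl (fun movable r =>
    if (pvDirs.foldl (fun c d =>
          if 0 ≤ r.1 + d.1 ∧ r.1 + d.1 ≤ MAX_X - 1 ∧ 0 ≤ r.2 + d.2 ∧ r.2 + d.2 ≤ MAX_Y - 1 ∧
              (r.1 + d.1, r.2 + d.2) ∈ roll_set then c + 1 else c) (0 : Int)) < 4
    then PySem.Set.add movable r else movable) PySem.Set.empty

-- ===== PORT B =====
def get_movable_rolls_alt (roll_set : List (Int × Int)) (MAX_X : Int) (MAX_Y : Int) : List (Int × Int) :=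
  (PySem.Set.ofList roll_set).foldl (fun movable r =>
    if ((PySem.Set.ofList roll_set).foldl (fun d s =>
          if 0 ≤ s.1 ∧ s.1 ≤ MAX_X - 1 ∧ 0 ≤ s.2 ∧ s.2 ≤ MAX_Y - 1 then
            pvDirs.foldl (fun d dd =>
              if (s.1 + dd.1, s.2 + dd.2) ∈ roll_set then
                d.modify (s.1 + dd.1, s.2 + dd.2) 0 (· + 1)
              else d) d
          else d)
        ((PySem.Set.ofList roll_set).foldl (fun d r => d.insert r (0 : Int)) PySem.Dict.empty)).getD r 0 < 4
    then PySem.Set.add movable r else movable) PySem.Set.empty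

-- ===== PRECONDITION & SPEC =====
def Spec_get_movable_rolls (roll_set : List (Int × Int)) (MAX_X : Int) (MAX_Y : Int) (out : List (Int × Int)) : Prop := out = get_movable_rolls_alt roll_set MAX_X MAX_Y
instance (roll_set : List (Int × Int)) (MAX_X : Int) (MAX_Y : Int) (out : List (Int × Int)) : Decidable (Spec_get_movable_rolls roll_set MAX_X MAX_Y out) := by unfold Spec_get_movable_rolls; infer_instance

-- ===== CLAIM (what is proved, stated in full; the proofs are below) =====
def Claim_equal_get_movable_rolls : Prop := ∀ (roll_set : List (Int × Int)) (MAX_X : Int) (MAX_Y : Int), Dom_get_movable_rolls roll_set MAX_X MAX_Y → Spec_get_movable_rolls roll_set MAX_X MAX_Y (get_movable_rolls roll_set MAX_X MAX_Y)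

-- ===== LEMMAS AND PROOFS =====

lemma pvDirs_eq : pvDirs = [(-1,-1),(-1,0),(-1,1),(0,-1),(0,1),(1,-1),(1,0),(1,1)] := by decide

lemma pvDirs_nodup : pvDirs.Nodup := by decide

lemma pvDirs_neg_mem {a b : Int} (h : (a, b) ∈ pvDirs) : (-a, -b) ∈ pvDirs := by
  rw [pvDirs_eq] at h ⊢
  simp only [List.mem_cons, List.not_mem_nil, or_false, Prod.mk.injEq] at h ⊢
  omega

-- the zero-initialisation pass never makes a tally non-zero
lemma init_getD (L : List (Int × Int)) (d : PySem.Dict (Int × Int) Int) (r : Int × Int)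
    (h : d.getD r 0 = 0) :
    (L.foldl (fun d r => d.insert r (0 : Int)) d).getD r 0 = 0 := by
  induction L generalizing d with
  | nil => exact h
  | cons s t ih =>
    simp only [List.foldl_cons]
    apply ih
    rw [PySem.Dict.getD_insert]
    split_ifs <;> simp [h]

-- one scattering roll s: its inner direction loop adds (occurrences of r among s's targets)
lemma inner_getD (roll_set : List (Int × Int)) (s : Int × Int)
    (d : PySem.Dict (Int × Int) Int) (r : Int × Int) :
    (pvDirs.foldl (fun d dd =>
        if (s.1 + dd.1, s.2 + dd.2) ∈ roll_set then
          d.modify (s.1 + dd.1, s.2 + dd.2) 0 (· + 1)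
        else d) d).getD r 0
      = d.getD r 0 +
        (((pvDirs.filter (fun dd => decide ((s.1 + dd.1, s.2 + dd.2) ∈ roll_set))).map
            (fun dd => (s.1 + dd.1, s.2 + dd.2))).count r : Int) := by
  rw [PySem.List.foldl_ite_eq_foldl_filter]
  have h := PySem.Dict.getD_foldl_modify_add_one
    ((pvDirs.filter (fun dd => decide ((s.1 + dd.1, s.2 + dd.2) ∈ roll_set))).map
      (fun dd => (s.1 + dd.1, s.2 + dd.2))) d r
  rw [List.foldl_map] at h
  exact h

-- the whole scatter pass: the tally of r is the sum of the per-roll contributions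
lemma scatter_getD (roll_set : List (Int × Int)) (MAX_X MAX_Y : Int)
    (L : List (Int × Int)) (d : PySem.Dict (Int × Int) Int) (r : Int × Int) :
    (L.foldl (fun d s =>
        if 0 ≤ s.1 ∧ s.1 ≤ MAX_X - 1 ∧ 0 ≤ s.2 ∧ s.2 ≤ MAX_Y - 1 then
          pvDirs.foldl (fun d dd =>
            if (s.1 + dd.1, s.2 + dd.2) ∈ roll_set then
              d.modify (s.1 + dd.1, s.2 + dd.2) 0 (· + 1)
            else d) d
        else d) d).getD r 0
      = d.getD r 0 +
        (L.map (fun s =>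
          if 0 ≤ s.1 ∧ s.1 ≤ MAX_X - 1 ∧ 0 ≤ s.2 ∧ s.2 ≤ MAX_Y - 1 then
            (((pvDirs.filter (fun dd => decide ((s.1 + dd.1, s.2 + dd.2) ∈ roll_set))).map
                (fun dd => (s.1 + dd.1, s.2 + dd.2))).count r : Int)
          else 0)).sum := by
  induction L generalizing d with
  | nil => simp
  | cons s t ih =>
    simp only [List.foldl_cons, List.map_cons, List.sum_cons]
    split_ifs with hs
    · rw [ih, inner_getD]; ring
    · rw [ih]; ring

-- per scattering roll s: r occurs among s's targets exactly when r - s is a direction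
lemma targets_count (roll_set : List (Int × Int)) (s r : Int × Int) (hr : r ∈ roll_set) :
    ((pvDirs.filter (fun dd => decide ((s.1 + dd.1, s.2 + dd.2) ∈ roll_set))).map
        (fun dd => (s.1 + dd.1, s.2 + dd.2))).count r
      = if (r.1 - s.1, r.2 - s.2) ∈ pvDirs then 1 else 0 := by
  rw [List.count_eq_countP, List.countP_map, List.countP_filter]
  have step : List.countP (fun a =>
      ((fun x => x == r) ∘ fun dd => (s.1 + dd.1, s.2 + dd.2)) a &&
        decide ((s.1 + a.1, s.2 + a.2) ∈ roll_set)) pvDirs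
      = List.countP (fun a => a == (r.1 - s.1, r.2 - s.2)) pvDirs := by
    apply List.countP_congr
    intro dd _
    by_cases hdd : dd = (r.1 - s.1, r.2 - s.2)
    · subst hdd
      simp [Function.comp, hr]
    · have h2 : (s.1 + dd.1, s.2 + dd.2) ≠ r := by
        intro h; apply hdd; cases dd; cases r
        simp only [Prod.mk.injEq] at h ⊢; omega
      simp [Function.comp, h2, hdd]
  rw [step, ← List.count_eq_countP]
  split_ifs with hmem
  · exact List.count_eq_one_of_mem pvDirs_nodup hmem
  · exact List.count_eq_zero_of_not_mem hmem

-- reciprocity: counting the in-bounds rolls s with r - s a direction equals counting the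
-- directions d with r + d an in-bounds roll (bijection s = r + d; pvDirs is symmetric)
lemma recip (roll_set : List (Int × Int)) (MAX_X MAX_Y : Int) (r : Int × Int) :
    List.countP (fun s =>
        decide ((0 ≤ s.1 ∧ s.1 ≤ MAX_X - 1 ∧ 0 ≤ s.2 ∧ s.2 ≤ MAX_Y - 1) ∧
                (r.1 - s.1, r.2 - s.2) ∈ pvDirs)) (PySem.Set.ofList roll_set)
      = List.countP (fun d =>
          decide (0 ≤ r.1 + d.1 ∧ r.1 + d.1 ≤ MAX_X - 1 ∧ 0 ≤ r.2 + d.2 ∧ r.2 + d.2 ≤ MAX_Y - 1 ∧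
                  (r.1 + d.1, r.2 + d.2) ∈ PySem.Set.ofList roll_set)) pvDirs := by
  have hndL : List.Nodup (PySem.Set.ofList roll_set) := PySem.Set.nodup_ofList roll_set
  rw [List.countP_eq_length_filter, List.countP_eq_length_filter]
  rw [← List.toFinset_card_of_nodup (hndL.filter _),
      ← List.toFinset_card_of_nodup (pvDirs_nodup.filter _)]
  apply Finset.card_nbij' (i := fun s => (s.1 - r.1, s.2 - r.2))
    (j := fun d => (r.1 + d.1, r.2 + d.2))
  · intro s hs
    simp only [List.coe_toFinset, Set.mem_setOf_eq, List.mem_filter,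
      decide_eq_true_eq] at hs ⊢
    obtain ⟨hsL, hbd, hdir⟩ := hs
    have hneg : (s.1 - r.1, s.2 - r.2) ∈ pvDirs := by
      have := pvDirs_neg_mem hdir
      simpa [neg_sub] using this
    have e1 : r.1 + (s.1 - r.1) = s.1 := by ring
    have e2 : r.2 + (s.2 - r.2) = s.2 := by ring
    refine ⟨hneg, ?_⟩
    simp only [e1, e2]
    exact ⟨hbd.1, hbd.2.1, hbd.2.2.1, hbd.2.2.2, by simpa using hsL⟩
  · intro d hd
    simp only [List.coe_toFinset, Set.mem_setOf_eq, List.mem_filter,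
      decide_eq_true_eq] at hd ⊢
    obtain ⟨hdD, hb1, hb2, hb3, hb4, hmem⟩ := hd
    refine ⟨hmem, ⟨hb1, hb2, hb3, hb4⟩, ?_⟩
    have e1 : r.1 - (r.1 + d.1) = -d.1 := by ring
    have e2 : r.2 - (r.2 + d.2) = -d.2 := by ring
    rw [e1, e2]
    exact pvDirs_neg_mem (by simpa using hdD)
  · intro s hs
    simp only [List.coe_toFinset, Set.mem_setOf_eq] at hs
    cases s; simp only [Prod.mk.injEq]; constructor <;> ring
  · intro d hd
    simp only [List.coe_toFinset, Set.mem_setOf_eq] at hd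
    cases d; simp only [Prod.mk.injEq]; constructor <;> ring

-- for a roll r of the set, A's gathered neighbour count equals B's scattered tally of r
lemma count_agree (roll_set : List (Int × Int)) (MAX_X MAX_Y : Int) (r : Int × Int)
    (hr : r ∈ PySem.Set.ofList roll_set) :
    pvDirs.foldl (fun c d =>
        if 0 ≤ r.1 + d.1 ∧ r.1 + d.1 ≤ MAX_X - 1 ∧ 0 ≤ r.2 + d.2 ∧ r.2 + d.2 ≤ MAX_Y - 1 ∧
            (r.1 + d.1, r.2 + d.2) ∈ roll_set then c + 1 else c) (0 : Int)
    = ((PySem.Set.ofList roll_set).foldl (fun d s =>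
          if 0 ≤ s.1 ∧ s.1 ≤ MAX_X - 1 ∧ 0 ≤ s.2 ∧ s.2 ≤ MAX_Y - 1 then
            pvDirs.foldl (fun d dd =>
              if (s.1 + dd.1, s.2 + dd.2) ∈ roll_set then
                d.modify (s.1 + dd.1, s.2 + dd.2) 0 (· + 1)
              else d) d
          else d)
        ((PySem.Set.ofList roll_set).foldl (fun d r => d.insert r (0 : Int))
          PySem.Dict.empty)).getD r 0 := by
  have hr' : r ∈ roll_set := (PySem.Set.mem_ofList roll_set r).mp hr
  rw [PySem.List.foldl_ite_add_one, scatter_getD,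
    init_getD _ _ _ (PySem.Dict.getD_empty r 0)]
  have hmap : (PySem.Set.ofList roll_set).map (fun s =>
        if 0 ≤ s.1 ∧ s.1 ≤ MAX_X - 1 ∧ 0 ≤ s.2 ∧ s.2 ≤ MAX_Y - 1 then
          (((pvDirs.filter (fun dd => decide ((s.1 + dd.1, s.2 + dd.2) ∈ roll_set))).map
              (fun dd => (s.1 + dd.1, s.2 + dd.2))).count r : Int)
        else 0)
      = (PySem.Set.ofList roll_set).map (fun s =>
          if (fun s => decide ((0 ≤ s.1 ∧ s.1 ≤ MAX_X - 1 ∧ 0 ≤ s.2 ∧ s.2 ≤ MAX_Y - 1) ∧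
              (r.1 - s.1, r.2 - s.2) ∈ pvDirs)) s = true then (1 : Int) else 0) := by
    apply List.map_congr_left
    intro s _
    rw [targets_count roll_set s r hr']
    simp only [decide_eq_true_eq]
    split_ifs <;> simp_all
  rw [hmap, PySem.List.sum_map_ite_one_zero, recip roll_set MAX_X MAX_Y r]
  have : ∀ d : Int × Int, ((r.1 + d.1, r.2 + d.2) ∈ PySem.Set.ofList roll_set)
      ↔ ((r.1 + d.1, r.2 + d.2) ∈ roll_set) := fun d => PySem.Set.mem_ofList roll_set _
  congr 1
  congr 1
  apply List.countP_congr
  intro d _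
  simp [this d]

-- ===== VERDICT (by name: the statement is the Claim_ definition above) =====
theorem get_movable_rolls_spec : Claim_equal_get_movable_rolls := by
  intro roll_set MAX_X MAX_Y _
  unfold Spec_get_movable_rolls get_movable_rolls get_movable_rolls_alt
  apply PySem.List.foldl_congr_mem
  intro acc r hr
  rw [count_agree roll_set MAX_X MAX_Y r hr]
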